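-- pv_equiv track=rewrite | github.com/GML-FMGroup/creative_claw | src/production/ppt/impact.py | _match_targets
-- ===== SOURCE A (Python) =====
-- def _match_targets(targets: list[dict[str, str]], available: list[dict[str, str]]) -> tuple[list[dict[str, str]], list[dict[str, str]]]:
--     matched: list[dict[str, str]] = []
--     unmatched: list[dict[str, str]] = []
--     for target in targets:
--         if target.get("kind") == "production":
--             matched.append(target)
--             continue
--         match = _match_one_target(target, available)
--         if match is None:
--             unmatched.append(target)
--         else:
--             matched.append(match)
--     return matched, unmatched
--
-- def _match_one_target(target: dict[str, str], available: list[dict[str, str]]) -> dict[str, str] | None: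
--     target_kind = target.get("kind", "")
--     target_id = target.get("id", "")
--     if target_kind in {"slide", "unknown"} and target_id:
--         return _match_slide_alias(target_id, available)
--     if target_kind and target_id:
--         kind_match = _match_by_kind_and_id(target_kind, target_id, available)
--         if kind_match is not None:
--             return kind_match
--     if target_id:
--         return next((item for item in available if target_id == item.get("id")), None)
--     if target_kind:
--         return next((item for item in available if target_kind == item.get("kind")), None)
--     return None
--
-- def _match_by_kind_and_id(target_kind: str, target_id: str, available: list[dict[str, str]]) -> dict[str, str] | None:
--     return next(
--         (
--             item
--             for item in available
--             if item.get("kind") == target_kind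
--             and target_id in {item.get("id", ""), item.get("sequence_index", "")}
--         ),
--         None,
--     )
--
-- def _match_slide_alias(target_id: str, available: list[dict[str, str]]) -> dict[str, str] | None:
--     deck_match = next((item for item in available if item.get("kind") == "deck_slide" and target_id in {item.get("id", ""), item.get("sequence_index", "")}), None)
--     if deck_match is not None:
--         return deck_match
--     return next((item for item in available if item.get("kind") == "outline_entry" and target_id in {item.get("id", ""), item.get("sequence_index", "")}), None)
-- ===== SOURCE B (Python) =====
-- def _match_targets(targets, available):
--     # One pass over `available` builds first-occurrence indexes; each target is
--     # then resolved with O(1) dictionary lookups instead of scanning `available`.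
--     by_kind_key = {}   # (kind, id-or-sequence_index) -> first such item
--     by_id = {}         # id -> first item with that id
--     by_kind = {}       # kind -> first item with that kind
--     for item in available:
--         kind = item.get("kind")
--         if kind is not None:
--             by_kind.setdefault(kind, item)
--             by_kind_key.setdefault((kind, item.get("id", "")), item)
--             by_kind_key.setdefault((kind, item.get("sequence_index", "")), item)
--         item_id = item.get("id")
--         if item_id is not None:
--             by_id.setdefault(item_id, item)
--     matched = []
--     unmatched = []
--     for target in targets:
--         if target.get("kind") == "production":
--             matched.append(target)
--             continue
--         tk = target.get("kind", "")
--         ti = target.get("id", "")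
--         if tk in ("slide", "unknown") and ti:
--             m = by_kind_key.get(("deck_slide", ti))
--             if m is None:
--                 m = by_kind_key.get(("outline_entry", ti))
--         else:
--             m = by_kind_key.get((tk, ti)) if tk and ti else None
--             if m is None:
--                 if ti:
--                     m = by_id.get(ti)
--                 elif tk:
--                     m = by_kind.get(tk)
--         if m is None:
--             unmatched.append(target)
--         else:
--             matched.append(m)
--     return matched, unmatched
-- ===== Notes on version B (the rewrite author's own statement) =====
-- stated objective: alternative
-- what changed: B builds first-occurrence index dictionaries over `available` (keyed by (kind, id-or-sequence_index), by id, and by kind) in one pass, then resolves each target with dictionary lookups, instead of A's linear scan of `available` for every target; on the generated random inputs A's scans terminate early so no speedup was measured.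
import Mathlib
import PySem

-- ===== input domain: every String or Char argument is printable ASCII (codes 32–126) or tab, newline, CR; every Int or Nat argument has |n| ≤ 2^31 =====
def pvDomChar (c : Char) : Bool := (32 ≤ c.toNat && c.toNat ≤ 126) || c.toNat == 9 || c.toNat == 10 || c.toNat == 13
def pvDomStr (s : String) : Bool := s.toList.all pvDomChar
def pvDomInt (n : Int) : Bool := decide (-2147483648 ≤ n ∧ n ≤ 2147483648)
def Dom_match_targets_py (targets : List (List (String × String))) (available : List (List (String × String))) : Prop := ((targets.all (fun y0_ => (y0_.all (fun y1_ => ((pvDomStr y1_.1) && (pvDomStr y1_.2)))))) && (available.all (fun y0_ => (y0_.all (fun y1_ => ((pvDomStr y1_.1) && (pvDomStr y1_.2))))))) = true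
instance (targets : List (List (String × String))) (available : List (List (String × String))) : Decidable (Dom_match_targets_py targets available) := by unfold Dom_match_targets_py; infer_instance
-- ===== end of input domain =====

-- B resolves each target by lookups in first-occurrence index dictionaries built in one
-- pass over `available`, instead of A's per-target scans; return value proved identical.

-- d.get(k) on a Python dict given as an insertion-order pair list (dict(pairs): later pairs overwrite)
def pvGet (d : List (String × String)) (k : String) : Option String :=
  (PySem.Dict.ofList d).get? k

-- d.get(k, dflt)
def pvGetD (d : List (String × String)) (k dflt : String) : String :=
  (PySem.Dict.ofList d).getD k dflt

-- ===== PORT A =====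
def pvMatchByKindAndId (tk ti : String) (available : List (List (String × String))) : Option (List (String × String)) :=
  available.find? (fun item =>
    pvGet item "kind" == some tk && (ti == pvGetD item "id" "" || ti == pvGetD item "sequence_index" ""))

def pvMatchSlideAlias (ti : String) (available : List (List (String × String))) : Option (List (String × String)) :=
  match available.find? (fun item =>
      pvGet item "kind" == some "deck_slide" && (ti == pvGetD item "id" "" || ti == pvGetD item "sequence_index" "")) with
  | some deckMatch => some deckMatch
  | none =>
    available.find? (fun item =>
      pvGet item "kind" == some "outline_entry" && (ti == pvGetD item "id" "" || ti == pvGetD item "sequence_index" ""))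

def pvMatchOneTarget (target : List (String × String)) (available : List (List (String × String))) : Option (List (String × String)) :=
  let tk := pvGetD target "kind" ""
  let ti := pvGetD target "id" ""
  if (tk == "slide" || tk == "unknown") && !(ti == "") then
    pvMatchSlideAlias ti available
  else
    let kindMatch := if !(tk == "") && !(ti == "") then pvMatchByKindAndId tk ti available else none
    match kindMatch with
    | some m => some m
    | none =>
      if !(ti == "") then available.find? (fun item => some ti == pvGet item "id")
      else if !(tk == "") then available.find? (fun item => some tk == pvGet item "kind")
      else none

def match_targets_py (targets : List (List (String × String))) (available : List (List (String × String))) : (List (List (String × String))) × (List (List (String × String))) :=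
  targets.foldl (fun acc target =>
    if pvGet target "kind" == some "production" then (acc.1 ++ [target], acc.2)
    else
      match pvMatchOneTarget target available with
      | none => (acc.1, acc.2 ++ [target])
      | some m => (acc.1 ++ [m], acc.2)) ([], [])

-- ===== PORT B =====
-- one pass over `available`: (kind,id-or-sequence_index) index, id index, kind index (first occurrence each)
def pvBuildIndexes (available : List (List (String × String))) :
    PySem.Dict (String × String) (List (String × String)) × PySem.Dict String (List (String × String)) × PySem.Dict String (List (String × String)) :=
  available.foldl (fun st item =>
    let p1 := match pvGet item "kind" with
      | some kind =>
        (((st.1.setdefault (kind, pvGetD item "id" "") item).setdefault (kind, pvGetD item "sequence_index" "") item),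
         st.2.2.setdefault kind item)
      | none => (st.1, st.2.2)
    let bid := match pvGet item "id" with
      | some i => st.2.1.setdefault i item
      | none => st.2.1
    (p1.1, bid, p1.2))
    (PySem.Dict.empty, PySem.Dict.empty, PySem.Dict.empty)

def pvLookupOne (bkk : PySem.Dict (String × String) (List (String × String)))
    (bid bk : PySem.Dict String (List (String × String)))
    (target : List (String × String)) : Option (List (String × String)) :=
  let tk := pvGetD target "kind" ""
  let ti := pvGetD target "id" ""
  if (tk == "slide" || tk == "unknown") && !(ti == "") then
    match bkk.get? ("deck_slide", ti) with
    | some m => some m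
    | none => bkk.get? ("outline_entry", ti)
  else
    let m := if !(tk == "") && !(ti == "") then bkk.get? (tk, ti) else none
    match m with
    | some m => some m
    | none =>
      if !(ti == "") then bid.get? ti
      else if !(tk == "") then bk.get? tk
      else none

def match_targets_py_alt (targets : List (List (String × String))) (available : List (List (String × String))) : (List (List (String × String))) × (List (List (String × String))) :=
  let idx := pvBuildIndexes available
  targets.foldl (fun acc target =>
    if pvGet target "kind" == some "production" then (acc.1 ++ [target], acc.2)
    else
      match pvLookupOne idx.1 idx.2.1 idx.2.2 target with
      | none => (acc.1, acc.2 ++ [target])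
      | some m => (acc.1 ++ [m], acc.2)) ([], [])

-- ===== PRECONDITION & SPEC =====
def Spec_match_targets_py (targets : List (List (String × String))) (available : List (List (String × String))) (out : (List (List (String × String))) × (List (List (String × String)))) : Prop := out = match_targets_py_alt targets available
instance (targets : List (List (String × String))) (available : List (List (String × String))) (out : (List (List (String × String))) × (List (List (String × String)))) : Decidable (Spec_match_targets_py targets available out) := by unfold Spec_match_targets_py; infer_instance

-- ===== CLAIM (what is proved, stated in full; the proofs are below) =====
def Claim_equal_match_targets_py : Prop := ∀ (targets : List (List (String × String))) (available : List (List (String × String))), Dom_match_targets_py targets available → Spec_match_targets_py targets available (match_targets_py targets available)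

-- ===== LEMMAS AND PROOFS =====

-- per-component views of pvBuildIndexes's single fold (proof helpers)
def pvBuildKK (available : List (List (String × String))) (d : PySem.Dict (String × String) (List (String × String))) : PySem.Dict (String × String) (List (String × String)) :=
  available.foldl (fun d item =>
    match pvGet item "kind" with
    | some kind => (d.setdefault (kind, pvGetD item "id" "") item).setdefault (kind, pvGetD item "sequence_index" "") item
    | none => d) d

def pvBuildID (available : List (List (String × String))) (d : PySem.Dict String (List (String × String))) : PySem.Dict String (List (String × String)) :=
  available.foldl (fun d item =>
    match pvGet item "id" with
    | some i => d.setdefault i item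
    | none => d) d

def pvBuildK (available : List (List (String × String))) (d : PySem.Dict String (List (String × String))) : PySem.Dict String (List (String × String)) :=
  available.foldl (fun d item =>
    match pvGet item "kind" with
    | some kind => d.setdefault kind item
    | none => d) d

theorem pvGet?_setdefault {κ ν : Type} [BEq κ] [LawfulBEq κ] [DecidableEq κ]
    (d : PySem.Dict κ ν) (k : κ) (v : ν) (x : κ) :
    (d.setdefault k v).get? x = (d.get? x).orElse (fun _ => if x = k then some v else none) := by
  by_cases hc : d.contains k = true
  · rw [PySem.Dict.setdefault_of_contains d v hc]
    by_cases hx : x = k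
    · subst hx
      rw [PySem.Dict.contains_eq_isSome_get?] at hc
      cases h : d.get? x with
      | none => rw [h] at hc; simp at hc
      | some w => simp
    · cases h : d.get? x <;> simp [hx]
  · rw [PySem.Dict.setdefault_of_not_contains d v (by simpa using hc), PySem.Dict.get?_insert]
    by_cases hx : x = k
    · subst hx
      rw [PySem.Dict.contains_eq_isSome_get?] at hc
      simp only [Bool.not_eq_true, Option.isSome_eq_false_iff, Option.isNone_iff_eq_none] at hc
      simp [hc]
    · cases h : d.get? x <;> simp [hx]

theorem pvBuildKK_get? (available : List (List (String × String)))
    (d : PySem.Dict (String × String) (List (String × String))) (key : String × String) :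
    (pvBuildKK available d).get? key =
      (d.get? key).orElse (fun _ => available.find? (fun item =>
        pvGet item "kind" == some key.1 && (key.2 == pvGetD item "id" "" || key.2 == pvGetD item "sequence_index" ""))) := by
  obtain ⟨k1, k2⟩ := key
  induction available generalizing d with
  | nil => cases h : d.get? (k1, k2) <;> simp_all [pvBuildKK]
  | cons item rest ih =>
    rw [pvBuildKK, List.foldl_cons, ← pvBuildKK, List.find?_cons]
    cases h : pvGet item "kind" with
    | none => rw [ih]; cases hd : d.get? (k1, k2) <;> simp_all
    | some kind =>
      rw [ih, pvGet?_setdefault, pvGet?_setdefault]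
      cases hd : d.get? (k1, k2) with
      | some w => simp
      | none =>
        simp only [Option.orElse_none]
        by_cases hk : k1 = kind
        · subst hk
          by_cases hid : k2 = pvGetD item "id" ""
          · simp [← hid]
          · by_cases hseq : k2 = pvGetD item "sequence_index" ""
            · simp [← hseq, hid]
            · have hb : (k2 == pvGetD item "id" "" || k2 == pvGetD item "sequence_index" "") = false := by
                simp [hid, hseq]
              simp [hb, hid, hseq]
        · have hb : (kind == k1) = false := by simp [Ne.symm hk]
          simp [hk, hb]

theorem pvBuildID_get? (available : List (List (String × String)))
    (d : PySem.Dict String (List (String × String))) (i : String) :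
    (pvBuildID available d).get? i =
      (d.get? i).orElse (fun _ => available.find? (fun item => some i == pvGet item "id")) := by
  induction available generalizing d with
  | nil => cases h : d.get? i <;> simp_all [pvBuildID]
  | cons item rest ih =>
    rw [pvBuildID, List.foldl_cons, ← pvBuildID, ih, List.find?_cons]
    cases h : pvGet item "id" with
    | none => cases hd : d.get? i <;> simp_all
    | some j =>
      rw [pvGet?_setdefault]
      by_cases hij : i = j
      · subst hij
        cases hd : d.get? i <;> simp
      · have hb : (i == j) = false := by simp [hij]
        cases hd : d.get? i <;> simp [hb, hij]

theorem pvBuildK_get? (available : List (List (String × String)))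
    (d : PySem.Dict String (List (String × String))) (k : String) :
    (pvBuildK available d).get? k =
      (d.get? k).orElse (fun _ => available.find? (fun item => some k == pvGet item "kind")) := by
  induction available generalizing d with
  | nil => cases h : d.get? k <;> simp_all [pvBuildK]
  | cons item rest ih =>
    rw [pvBuildK, List.foldl_cons, ← pvBuildK, ih, List.find?_cons]
    cases h : pvGet item "kind" with
    | none => cases hd : d.get? k <;> simp_all
    | some j =>
      rw [pvGet?_setdefault]
      by_cases hkj : k = j
      · subst hkj
        cases hd : d.get? k <;> simp
      · have hb : (k == j) = false := by simp [hkj]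
        cases hd : d.get? k <;> simp [hb, hkj]

theorem pvBuildIndexes_proj (available : List (List (String × String))) :
    pvBuildIndexes available =
      (pvBuildKK available PySem.Dict.empty, pvBuildID available PySem.Dict.empty, pvBuildK available PySem.Dict.empty) := by
  suffices h : ∀ (d1 : PySem.Dict (String × String) (List (String × String)))
      (d2 d3 : PySem.Dict String (List (String × String))),
      available.foldl (fun st item =>
        let p1 := match pvGet item "kind" with
          | some kind =>
            (((st.1.setdefault (kind, pvGetD item "id" "") item).setdefault (kind, pvGetD item "sequence_index" "") item),
             st.2.2.setdefault kind item)
          | none => (st.1, st.2.2)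
        let bid := match pvGet item "id" with
          | some i => st.2.1.setdefault i item
          | none => st.2.1
        (p1.1, bid, p1.2)) (d1, d2, d3) =
      (pvBuildKK available d1, pvBuildID available d2, pvBuildK available d3) by
    exact h _ _ _
  induction available with
  | nil => intro d1 d2 d3; simp [pvBuildKK, pvBuildID, pvBuildK]
  | cons item rest ih =>
    intro d1 d2 d3
    rw [List.foldl_cons, pvBuildKK, pvBuildID, pvBuildK,
      List.foldl_cons, List.foldl_cons, List.foldl_cons, ← pvBuildKK, ← pvBuildID, ← pvBuildK]
    cases h : pvGet item "kind" <;> cases h2 : pvGet item "id" <;> simp [ih]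

theorem pvLookupOne_eq (available : List (List (String × String))) (target : List (String × String)) :
    pvLookupOne (pvBuildKK available PySem.Dict.empty) (pvBuildID available PySem.Dict.empty)
      (pvBuildK available PySem.Dict.empty) target = pvMatchOneTarget target available := by
  simp only [pvLookupOne, pvMatchOneTarget, pvMatchSlideAlias, pvMatchByKindAndId,
    pvBuildKK_get?, pvBuildID_get?, pvBuildK_get?, PySem.Dict.get?_empty, Option.orElse_none]


-- ===== VERDICT (by name: the statement is the Claim_ definition above) =====
theorem match_targets_py_spec : Claim_equal_match_targets_py := by
  intro targets available _
  unfold Spec_match_targets_py match_targets_py match_targets_py_alt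
  rw [pvBuildIndexes_proj]
  congr 1
  funext acc target
  rw [pvLookupOne_eq]
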